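-- pv_equiv track=rewrite | github.com/Zachary1575/jobscrper | job_service/util/utility.py | divide_pages_into_three_parts
-- ===== SOURCE A (Python) =====
-- def divide_pages_into_three_parts(total_pages):
--     """
--     DOC STRING
--     """
--     part_size = total_pages // 3
--     remainder = total_pages % 3
--
--     parts = []
--     start_page = 1
--
--     for i in range(3):
--         end_page = start_page + part_size - 1
--         if remainder > 0:
--             end_page += 1
--             remainder -= 1
--
--         parts.append((start_page, end_page))
--         start_page = end_page + 1
--
--     return parts
-- ===== SOURCE B (Python) =====
-- def divide_pages_into_three_parts(total_pages):
--     part_size, remainder = divmod(total_pages, 3)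
--     return [
--         (i * part_size + min(i, remainder) + 1,
--          (i + 1) * part_size + min(i + 1, remainder))
--         for i in range(3)
--     ]
-- ===== Notes on version B (the rewrite author's own statement) =====
-- stated objective: simpler
-- what changed: Replaces A's sequential loop threading a running start_page and a decremented remainder with a per-index closed-form comprehension (start and end computed independently from i via divmod and min).
import Mathlib
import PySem

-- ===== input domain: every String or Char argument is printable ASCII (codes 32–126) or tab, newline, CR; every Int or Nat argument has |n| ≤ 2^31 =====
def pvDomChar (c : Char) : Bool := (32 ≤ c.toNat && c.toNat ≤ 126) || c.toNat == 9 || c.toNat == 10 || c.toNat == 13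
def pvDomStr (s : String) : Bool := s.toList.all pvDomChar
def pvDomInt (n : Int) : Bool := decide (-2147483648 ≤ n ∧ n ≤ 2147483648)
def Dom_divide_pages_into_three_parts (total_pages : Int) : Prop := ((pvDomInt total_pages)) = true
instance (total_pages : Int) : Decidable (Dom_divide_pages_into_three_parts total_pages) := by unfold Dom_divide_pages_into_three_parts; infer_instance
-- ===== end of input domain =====

-- B replaces A's running-accumulator loop with a per-index closed-form comprehension (objective: simpler).

-- ===== PORT A =====
-- literal transliteration: the for-loop threads (parts, start_page, remainder) through range(3)
def divide_pages_into_three_parts (total_pages : Int) : List (Int × Int) :=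
  let part_size := PySem.Int.floordiv total_pages 3
  let remainder := PySem.Int.mod total_pages 3
  let st := (PySem.List.pyRange 0 3 1).foldl
    (fun (s : List (Int × Int) × Int × Int) _ =>
      let (parts, start_page, remainder) := s
      let end_page := start_page + part_size - 1
      let (end_page, remainder) :=
        if remainder > 0 then (end_page + 1, remainder - 1) else (end_page, remainder)
      (parts ++ [(start_page, end_page)], end_page + 1, remainder))
    ([], 1, remainder)
  st.1

-- ===== PORT B =====
-- comprehension over range(3): each pair computed in closed form from its index
def divide_pages_into_three_parts_alt (total_pages : Int) : List (Int × Int) :=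
  let part_size := PySem.Int.floordiv total_pages 3
  let remainder := PySem.Int.mod total_pages 3
  (PySem.List.pyRange 0 3 1).map
    (fun i => (i * part_size + min i remainder + 1,
               (i + 1) * part_size + min (i + 1) remainder))

-- ===== PRECONDITION & SPEC =====
def Spec_divide_pages_into_three_parts (total_pages : Int) (out : List (Int × Int)) : Prop := out = divide_pages_into_three_parts_alt total_pages
instance (total_pages : Int) (out : List (Int × Int)) : Decidable (Spec_divide_pages_into_three_parts total_pages out) := by unfold Spec_divide_pages_into_three_parts; infer_instance

-- ===== CLAIM (what is proved, stated in full; the proofs are below) =====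
def Claim_equal_divide_pages_into_three_parts : Prop := ∀ (total_pages : Int), Dom_divide_pages_into_three_parts total_pages → Spec_divide_pages_into_three_parts total_pages (divide_pages_into_three_parts total_pages)

-- ===== LEMMAS AND PROOFS =====
theorem pyRange03 : PySem.List.pyRange 0 3 1 = [0, 1, 2] := by decide

-- ===== VERDICT (by name: the statement is the Claim_ definition above) =====
theorem divide_pages_into_three_parts_spec : Claim_equal_divide_pages_into_three_parts := by
  intro t _
  unfold Spec_divide_pages_into_three_parts divide_pages_into_three_parts divide_pages_into_three_parts_alt
  have h1 : 0 ≤ PySem.Int.mod t 3 := PySem.Int.mod_nonneg t (by norm_num)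
  have h2 : PySem.Int.mod t 3 < 3 := PySem.Int.mod_lt t (by norm_num)
  rw [pyRange03]
  set r := PySem.Int.mod t 3 with hr
  interval_cases r <;>
    simp [List.foldl, min_def] <;> omega
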